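-- pv_equiv track=rewrite | github.com/dereksuun/document-ingestion-portal | documents/services.py | _select_barcode_and_line
-- ===== SOURCE A (Python) =====
-- def _select_barcode_and_line(candidates):
--     line_digitavel = None
--     barcode = None
--     for cand in candidates:
--         if len(cand) in {47, 48} and not line_digitavel:
--             line_digitavel = cand
--         if len(cand) == 44 and not barcode:
--             barcode = cand
--     return line_digitavel, barcode
-- ===== SOURCE B (Python) =====
-- def _select_barcode_and_line(candidates):
--     cands = list(candidates)
--     line_digitavel = next((c for c in cands if len(c) in (47, 48)), None)
--     barcode = next((c for c in cands if len(c) == 44), None)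
--     return line_digitavel, barcode
-- ===== Notes on version B (the rewrite author's own statement) =====
-- stated objective: simpler
-- what changed: Replaces the single interleaved loop with mutable first-match flags by two independent short-circuiting next()/find-first scans over the materialized list, one per target length.
import Mathlib
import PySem

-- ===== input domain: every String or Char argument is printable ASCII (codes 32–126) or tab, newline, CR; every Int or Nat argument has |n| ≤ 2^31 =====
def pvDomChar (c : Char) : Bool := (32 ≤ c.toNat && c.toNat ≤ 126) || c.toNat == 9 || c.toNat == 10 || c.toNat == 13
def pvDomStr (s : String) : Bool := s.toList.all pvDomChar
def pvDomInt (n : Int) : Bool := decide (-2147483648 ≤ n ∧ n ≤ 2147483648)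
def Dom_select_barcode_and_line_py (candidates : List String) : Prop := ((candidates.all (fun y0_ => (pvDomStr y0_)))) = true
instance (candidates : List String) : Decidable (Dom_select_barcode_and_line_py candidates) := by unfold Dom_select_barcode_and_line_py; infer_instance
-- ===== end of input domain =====

-- B replaces A's single interleaved loop (mutable first-match slots) with two independent
-- short-circuiting find-first scans, one per target length; objective: simpler.

-- ===== PORT A =====
-- Python truthiness of an Optional[str]: falsy iff None or "".
def pvFalsyOptStr (o : Option String) : Bool :=
  match o with
  | none => true
  | some s => s.toList.isEmpty

def pvStepA (st : Option String × Option String) (cand : String) : Option String × Option String :=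
  let l := if (PySem.Str.len cand == 47 || PySem.Str.len cand == 48) && pvFalsyOptStr st.1 then some cand else st.1
  let b := if (PySem.Str.len cand == 44) && pvFalsyOptStr st.2 then some cand else st.2
  (l, b)

def select_barcode_and_line_py (candidates : List String) : Option String × Option String :=
  candidates.foldl pvStepA (none, none)

-- ===== PORT B =====
def pvIsLine (c : String) : Bool := PySem.Str.len c == 47 || PySem.Str.len c == 48
def pvIsBar (c : String) : Bool := PySem.Str.len c == 44

def select_barcode_and_line_py_alt (candidates : List String) : Option String × Option String :=
  let cands := candidates
  (cands.find? pvIsLine, cands.find? pvIsBar)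

-- ===== PRECONDITION & SPEC =====
def Spec_select_barcode_and_line_py (candidates : List String) (out : Option String × Option String) : Prop := out = select_barcode_and_line_py_alt candidates
instance (candidates : List String) (out : Option String × Option String) : Decidable (Spec_select_barcode_and_line_py candidates out) := by unfold Spec_select_barcode_and_line_py; infer_instance

-- ===== CLAIM (what is proved, stated in full; the proofs are below) =====
def Claim_equal_select_barcode_and_line_py : Prop := ∀ (candidates : List String), Dom_select_barcode_and_line_py candidates → Spec_select_barcode_and_line_py candidates (select_barcode_and_line_py candidates)

-- ===== LEMMAS AND PROOFS =====

theorem pvFalsy_of_isLine (c : String) (h : pvIsLine c = true) : pvFalsyOptStr (some c) = false := by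
  simp [pvIsLine, PySem.Str.len_eq] at h
  simp [pvFalsyOptStr, List.isEmpty_iff]
  intro he
  simp [he] at h

theorem pvFalsy_of_isBar (c : String) (h : pvIsBar c = true) : pvFalsyOptStr (some c) = false := by
  simp [pvIsBar, PySem.Str.len_eq] at h
  simp [pvFalsyOptStr, List.isEmpty_iff]
  intro he
  simp [he] at h

theorem fst_frozen (cs : List String) (l : Option String) (b : Option String)
    (h : pvFalsyOptStr l = false) : (cs.foldl pvStepA (l, b)).1 = l := by
  induction cs generalizing b with
  | nil => rfl
  | cons c cs ih => simp [List.foldl, pvStepA, h]; exact ih _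

theorem snd_frozen (cs : List String) (l : Option String) (b : Option String)
    (h : pvFalsyOptStr b = false) : (cs.foldl pvStepA (l, b)).2 = b := by
  induction cs generalizing l with
  | nil => rfl
  | cons c cs ih => simp [List.foldl, pvStepA, h]; exact ih _

theorem fst_eq_find (cs : List String) (l : Option String) (b : Option String)
    (h : pvFalsyOptStr l = true) :
    (cs.foldl pvStepA (l, b)).1 = (cs.find? pvIsLine).or l := by
  induction cs generalizing b with
  | nil => rfl
  | cons c cs ih =>
    by_cases hc : pvIsLine c = true
    · have hc' := hc
      simp [pvIsLine] at hc'
      simp [List.foldl, pvStepA, h, hc', List.find?, hc,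
        fst_frozen cs (some c) _ (pvFalsy_of_isLine c hc)]
    · have hc2 := hc
      simp [pvIsLine, PySem.Str.len_eq] at hc2
      simp [List.foldl, pvStepA, List.find?, hc, hc2]
      exact ih _

theorem snd_eq_find (cs : List String) (l : Option String) (b : Option String)
    (h : pvFalsyOptStr b = true) :
    (cs.foldl pvStepA (l, b)).2 = (cs.find? pvIsBar).or b := by
  induction cs generalizing l with
  | nil => rfl
  | cons c cs ih =>
    by_cases hc : pvIsBar c = true
    · have hc' := hc
      simp [pvIsBar] at hc'
      simp [List.foldl, pvStepA, h, hc', List.find?, hc,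
        snd_frozen cs _ (some c) (pvFalsy_of_isBar c hc)]
    · have hc2 := hc
      simp [pvIsBar, PySem.Str.len_eq] at hc2
      simp [List.foldl, pvStepA, List.find?, hc, hc2]
      exact ih _

-- ===== VERDICT (by name: the statement is the Claim_ definition above) =====
theorem select_barcode_and_line_py_spec : Claim_equal_select_barcode_and_line_py := by
  intro candidates _
  unfold Spec_select_barcode_and_line_py select_barcode_and_line_py select_barcode_and_line_py_alt
  refine Prod.ext ?_ ?_
  · simpa using fst_eq_find candidates none none rfl
  · simpa using snd_eq_find candidates none none rfl
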